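-- pv_equiv track=rewrite | github.com/dhwpdnr/coding_test | programmers/230125_2.py | solution
-- ===== SOURCE A (Python) =====
-- from collections import Counter
--
-- def solution(s):
--     count = Counter(s)
--     ls = []
--     for key, value in count.items():
--         if value == 1:
--             ls.append(key)
--     ls.sort()
--     answer = ""
--     for i in ls:
--         answer += i
--     return answer
-- ===== SOURCE B (Python) =====
-- def solution(s):
--     # One pass over the sorted characters: a char occurred exactly once
--     # iff it differs from both neighbors in the sorted order.
--     chars = sorted(s)
--     n = len(chars)
--     out = []
--     prev = None
--     for i, x in enumerate(chars):
--         nxt = chars[i + 1] if i + 1 < n else None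
--         if prev != x and nxt != x:
--             out.append(x)
--         prev = x
--     return "".join(out)
-- ===== Notes on version B (the rewrite author's own statement) =====
-- stated objective: alternative
-- what changed: B drops the Counter frequency dictionary entirely: it sorts all characters once and keeps, in one indexed pass, exactly those that differ from both neighbors (i.e. occur exactly once), so the output is already in sorted order.
import Mathlib
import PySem

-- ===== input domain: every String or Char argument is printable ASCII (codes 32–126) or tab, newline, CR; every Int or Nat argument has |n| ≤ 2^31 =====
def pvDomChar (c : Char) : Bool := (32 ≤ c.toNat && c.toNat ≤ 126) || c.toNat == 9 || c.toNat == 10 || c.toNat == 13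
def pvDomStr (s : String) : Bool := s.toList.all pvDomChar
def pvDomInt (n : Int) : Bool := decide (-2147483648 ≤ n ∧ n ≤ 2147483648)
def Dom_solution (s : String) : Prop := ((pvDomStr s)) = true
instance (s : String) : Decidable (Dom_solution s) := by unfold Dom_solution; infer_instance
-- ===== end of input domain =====

-- B replaces A's Counter + filter + sort by a single neighbor scan over the sorted characters (alternative decomposition, same cost class).

-- ===== PORT A =====
def solution (s : String) : String :=
  let count := PySem.Dict.counter s.toList
  let ls := count.items.foldl (fun acc kv => if kv.2 == 1 then acc ++ [kv.1] else acc) ([] : List Char)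
  let ls := PySem.List.sorted ls (fun x => x) false
  let answer := ls.foldl (fun acc i => acc ++ [i]) ([] : List Char)
  String.ofList answer

-- ===== PORT B =====
-- loop body of B's 'for i, x in enumerate(chars)': state = (out, prev)
def altStep (chars : List Char) (n : Int) (st : List Char × Option Char) (ix : Int × Char) :
    List Char × Option Char :=
  let nxt : Option Char := if ix.1 + 1 < n then PySem.List.pyGet? chars (ix.1 + 1) else none
  (if st.2 ≠ some ix.2 ∧ nxt ≠ some ix.2 then st.1 ++ [ix.2] else st.1, some ix.2)

def solution_alt (s : String) : String :=
  let chars := PySem.List.sorted s.toList (fun x => x) false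
  let n : Int := (chars.length : Int)
  let out := ((PySem.List.enumerate chars).foldl (altStep chars n) (([] : List Char), (none : Option Char))).1
  String.ofList out

-- ===== PRECONDITION & SPEC =====
def Spec_solution (s : String) (out : String) : Prop := out = solution_alt s
instance (s : String) (out : String) : Decidable (Spec_solution s out) := by unfold Spec_solution; infer_instance

-- ===== CLAIM (what is proved, stated in full; the proofs are below) =====
def Claim_equal_solution : Prop := ∀ (s : String), Dom_solution s → Spec_solution s (solution s)

-- ===== LEMMAS AND PROOFS =====

-- B's loop as a structural recursion: keep a char iff it differs from the previous one and the next one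
def pvScan (prev : Option Char) : List Char → List Char
  | [] => []
  | x :: rest => (if prev ≠ some x ∧ rest.head? ≠ some x then [x] else []) ++ pvScan (some x) rest

theorem pvFold_eq_scan (c : List Char) :
    ∀ (d : List Char) (k : Nat) (out : List Char) (prev : Option Char), c.drop k = d →
    ((PySem.List.enumerate d (k : Int)).foldl (altStep c (c.length : Int)) (out, prev)).1
      = out ++ pvScan prev d := by
  intro d
  induction d with
  | nil => intro k out prev _; simp [PySem.List.enumerate_nil, pvScan]
  | cons x rest ih =>
    intro k out prev hdrop
    have hk : k < c.length := by
      by_contra hge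
      have : c.drop k = [] := List.drop_eq_nil_of_le (by omega)
      rw [hdrop] at this; exact List.cons_ne_nil _ _ this
    have hdrop1 : c.drop (k + 1) = rest := by
      have h1 : c.drop (k + 1) = (c.drop k).drop 1 := by rw [List.drop_drop]
      rw [h1, hdrop, List.drop_one, List.tail_cons]
    have hnxt : (if (k : Int) + 1 < (c.length : Int) then PySem.List.pyGet? c ((k : Int) + 1) else none)
        = rest.head? := by
      by_cases hlt : k + 1 < c.length
      · rw [if_pos (by omega)]
        have hcast : ((k : Int) + 1) = ((k + 1 : Nat) : Int) := by push_cast; ring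
        rw [hcast, PySem.List.pyGet?_natCast, ← hdrop1, List.head?_drop]
      · rw [if_neg (by omega)]
        have hrest : rest = [] := by
          rw [← hdrop1]; exact List.drop_eq_nil_of_le (by omega)
        rw [hrest]; rfl
    rw [PySem.List.enumerate_cons, List.foldl_cons]
    have hstep : altStep c (c.length : Int) (out, prev) ((k : Int), x)
        = ((if prev ≠ some x ∧ rest.head? ≠ some x then out ++ [x] else out), some x) := by
      simp only [altStep, hnxt]
    rw [hstep]
    have hcast : ((k : Int) + 1) = ((k + 1 : Nat) : Int) := by push_cast; ring
    rw [hcast, ih (k + 1) _ (some x) hdrop1, pvScan]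
    split_ifs <;> simp

theorem pvScan_eq_filter :
    ∀ (c : List Char), c.Pairwise (· ≤ ·) →
    ∀ (prev : Option Char), (∀ p, prev = some p → ∀ y ∈ c, p ≤ y) →
    pvScan prev c = c.filter (fun y => decide (c.count y = 1 ∧ prev ≠ some y)) := by
  intro c
  induction c with
  | nil => intro _ prev _; simp [pvScan]
  | cons x rest ih =>
    intro hpw prev hprev
    have hx : ∀ y ∈ rest, x ≤ y := (List.pairwise_cons.mp hpw).1
    have hrest : rest.Pairwise (· ≤ ·) := (List.pairwise_cons.mp hpw).2
    -- in a sorted list, x reoccurs iff it is the head of the tail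
    have hhd : rest.head? ≠ some x ↔ x ∉ rest := by
      cases rest with
      | nil => simp
      | cons h t =>
        constructor
        · intro hne hmem
          rcases List.mem_cons.mp hmem with heq | hmem'
          · exact hne (by simp [heq])
          · have h1 : h ≤ x := (List.pairwise_cons.mp hrest).1 x hmem'
            have h2 : x ≤ h := hx h (List.mem_cons_self)
            exact hne (by simp [le_antisymm h2 h1])
        · intro hnot hsome
          apply hnot
          simp only [List.head?_cons, Option.some_inj] at hsome
          rw [hsome]; exact List.mem_cons_self
    rw [pvScan, List.filter_cons]
    have htail : pvScan (some x) rest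
        = rest.filter (fun y => decide ((x :: rest).count y = 1 ∧ prev ≠ some y)) := by
      rw [ih hrest (some x) (by intro p hp y hy; cases hp; exact hx y hy)]
      apply List.filter_congr
      intro y hy
      by_cases hxy : y = x
      · subst hxy
        have hc : (y :: rest).count y = rest.count y + 1 := List.count_cons_self
        have hge : 1 ≤ rest.count y := List.count_pos_iff.mpr hy
        simp only [decide_eq_decide]
        constructor
        · rintro ⟨-, habs⟩; exact absurd rfl habs
        · rintro ⟨h1, -⟩; rw [hc] at h1; exact absurd h1 (by omega)
      · have hc : (x :: rest).count y = rest.count y := by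
          rw [List.count_cons]; simp [Ne.symm hxy]
        have hpy : prev ≠ some y := by
          intro hp
          rcases prev with _ | p
          · simp at hp
          · have hpv : p = y := by injection hp
            have hpx : p ≤ x := hprev p rfl x List.mem_cons_self
            have hxyle : x ≤ y := hx y hy
            subst hpv
            exact hxy (le_antisymm hpx hxyle)
        simp only [decide_eq_decide, hc]
        constructor
        · rintro ⟨h1, -⟩; exact ⟨h1, hpy⟩
        · rintro ⟨h1, -⟩; exact ⟨h1, by simpa using (Ne.symm hxy)⟩
    rw [htail]
    have hcx : (x :: rest).count x = rest.count x + 1 := List.count_cons_self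
    by_cases hcond : prev ≠ some x ∧ rest.head? ≠ some x
    · have hnot : x ∉ rest := hhd.mp hcond.2
      have hdec : (decide ((x :: rest).count x = 1 ∧ prev ≠ some x)) = true := by
        simp only [decide_eq_true_eq]
        exact ⟨by rw [hcx, List.count_eq_zero.mpr hnot], hcond.1⟩
      rw [if_pos hcond, hdec]; simp
    · have hdec : (decide ((x :: rest).count x = 1 ∧ prev ≠ some x)) = false := by
        simp only [decide_eq_false_iff_not]
        rintro ⟨h1, h2⟩
        apply hcond
        refine ⟨h2, hhd.mpr ?_⟩
        intro hmem
        have := List.count_pos_iff.mpr hmem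
        omega
      rw [if_neg hcond, hdec]; simp

-- the two result LISTS agree
theorem pv_lists_eq (l : List Char) :
    PySem.List.sorted ((PySem.Set.ofList l).filter (fun k => ((l.count k : Int) == 1))) (fun x => x) false
      = (PySem.List.sorted l (fun x => x) false).filter
          (fun y => decide ((PySem.List.sorted l (fun x => x) false).count y = 1 ∧ (none : Option Char) ≠ some y)) := by
  set c := PySem.List.sorted l (fun x => x) false with hc
  have hperm : c.Perm l := PySem.List.sorted_perm l (fun x => x) false
  have hcount : ∀ y, c.count y = l.count y := fun y => hperm.count_eq y
  have hmemc : ∀ y : Char, y ∈ c ↔ y ∈ l := fun y => hperm.mem_iff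
  -- simplify B's predicate
  have hBpred : c.filter (fun y => decide (c.count y = 1 ∧ (none : Option Char) ≠ some y))
      = c.filter (fun y => decide (l.count y = 1)) := by
    apply List.filter_congr; intro y _
    simp [hcount y]
  rw [hBpred]
  have hnd1 : (c.filter (fun y => decide (l.count y = 1))).Nodup := by
    rw [List.nodup_iff_count_le_one]
    intro a
    by_cases ha : l.count a = 1
    · rw [List.count_filter (by simpa using ha), hcount a, ha]
    · have hnm : a ∉ c.filter (fun y => decide (l.count y = 1)) := by
        intro hmem
        have := (List.mem_filter.mp hmem).2
        simp at this; exact ha this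
      rw [List.count_eq_zero.mpr hnm]; omega
  apply PySem.List.sorted_eq_of_perm_of_pairwise_lt
  · -- permutation: both sides are nodup with the same members
    have hnd2 : ((PySem.Set.ofList l).filter (fun k => ((l.count k : Int) == 1))).Nodup :=
      (PySem.Set.nodup_ofList l).filter _
    rw [List.perm_ext_iff_of_nodup hnd1 hnd2]
    intro y
    simp only [List.mem_filter, PySem.Set.mem_ofList, decide_eq_true_eq, beq_iff_eq, hmemc y]
    constructor
    · rintro ⟨hm, h1⟩; exact ⟨hm, by exact_mod_cast h1⟩
    · rintro ⟨hm, h1⟩; exact ⟨hm, by exact_mod_cast h1⟩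
  · -- strictly increasing: sorted (≤) + nodup
    have hle : (c.filter (fun y => decide (l.count y = 1))).Pairwise (· ≤ ·) :=
      (PySem.List.sorted_pairwise l (fun x => x)).filter _
    exact (hle.and hnd1).imp (fun h => lt_of_le_of_ne h.1 h.2)

-- ===== VERDICT (by name: the statement is the Claim_ definition above) =====
theorem solution_spec : Claim_equal_solution := by
  intro s _
  show solution s = solution_alt s
  simp only [solution, solution_alt]
  rw [PySem.Dict.items_counter,
    PySem.List.foldl_append_if (fun kv : Char × Int => kv.2 == 1) (fun kv => kv.1),
    List.filter_map, List.map_map, List.nil_append,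
    PySem.List.foldl_append_singleton_eq_self, List.nil_append]
  have hfold := pvFold_eq_scan (PySem.List.sorted s.toList (fun x => x) false)
    (PySem.List.sorted s.toList (fun x => x) false) 0 [] none (by simp)
  simp only [Nat.cast_zero] at hfold
  rw [hfold, List.nil_append,
    pvScan_eq_filter (PySem.List.sorted s.toList (fun x => x) false)
      (PySem.List.sorted_pairwise s.toList (fun x => x)) none
      (by intro p hp; simp at hp)]
  have h := pv_lists_eq s.toList
  congr 1
  simpa [Function.comp_def] using h
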